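-- pv_equiv track=rewrite | github.com/manlinzh/GCStormySeasInternal | GamesmanPy/games/src/games/horses.py | unhash
-- ===== SOURCE A (Python) =====
-- def unhash(position: int) -> tuple[str, str]:
--     position_arr = ['-'] * 9
--     turn = position & 0b1
--     position >>= 1
--     turn_char = 'o' if turn == 0b1 else 'x'
--     for i in range(8, -1, -1):
--         piece = position & 0b11
--         if piece != 0:
--             piece_char = 'x' if piece == 0b01 else 'o'
--             position_arr[i] = piece_char
--         position >>= 2
--     position_str = ''.join(position_arr)
--     return (position_str, turn_char)
-- ===== SOURCE B (Python) =====
-- def unhash(position: int) -> tuple[str, str]: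
--     turn_char = 'o' if position & 1 else 'x'
--     bits = format((position >> 1) & 0x3FFFF, '018b')
--     cells = []
--     for i in range(9):
--         chunk = int(bits[2 * i:2 * i + 2], 2)
--         cells.append('-' if chunk == 0 else 'x' if chunk == 1 else 'o')
--     return (''.join(cells), turn_char)
-- ===== Notes on version B (the rewrite author's own statement) =====
-- stated objective: alternative
-- what changed: B decodes the position by masking the 18 board bits, rendering them as a zero-padded binary string (format '018b') and slicing two characters per cell front-to-back, instead of A's destructive shift-and-mask loop that fills the array back-to-front.
import Mathlib
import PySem

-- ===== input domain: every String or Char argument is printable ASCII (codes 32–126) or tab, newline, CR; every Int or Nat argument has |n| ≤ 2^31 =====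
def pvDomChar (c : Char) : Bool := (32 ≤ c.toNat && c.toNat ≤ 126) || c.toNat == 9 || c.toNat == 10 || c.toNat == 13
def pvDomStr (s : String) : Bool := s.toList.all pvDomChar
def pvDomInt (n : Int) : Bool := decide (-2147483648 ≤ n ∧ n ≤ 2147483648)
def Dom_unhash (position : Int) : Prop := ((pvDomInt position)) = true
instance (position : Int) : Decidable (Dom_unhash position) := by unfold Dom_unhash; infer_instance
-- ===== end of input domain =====

-- B re-reads the 18 board bits through a zero-padded binary-string rendering (format '018b')
-- sliced two characters per cell, front to back, instead of A's destructive shift-and-mask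
-- loop that fills the array back to front (objective: alternative; same exact results).

-- ===== PORT A =====
def unhash (position : Int) : String × String :=
  let position_arr : List String := List.replicate 9 "-"
  let turn := PySem.Int.band position 1
  let position1 := position >>> (1 : Nat)
  let turn_char := if turn == 1 then "o" else "x"
  let st := (PySem.List.pyRange 8 (-1) (-1)).foldl
    (fun (st : List String × Int) (i : Int) =>
      let piece := PySem.Int.band st.2 3
      -- i runs over 8..0, always nonnegative, so position_arr[i] = … is .set i.toNat (exact)
      let arr := if piece ≠ 0 then
          st.1.set i.toNat (if piece == 1 then "x" else "o")
        else st.1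
      (arr, st.2 >>> (2 : Nat))) (position_arr, position1)
  (PySem.Str.join "" st.1, turn_char)

-- ===== PORT B =====
-- port of format(b, '0{w}b'): zero-padded binary rendering, exact for 0 ≤ b < 2^w
-- (B only calls it with the 18-bit masked body, which is in that range)
def fmtBin (w : Nat) (b : Nat) : List Char :=
  (List.range w).map (fun k => if b / 2 ^ (w - 1 - k) % 2 = 1 then '1' else '0')

-- port of int(s, 2): binary-string parse, exact for strings of '0'/'1' characters
def parseBin (cs : List Char) : Int :=
  cs.foldl (fun a c => 2 * a + (if c = '1' then 1 else 0)) 0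

def unhash_alt (position : Int) : String × String :=
  let turn_char := if PySem.Int.band position 1 ≠ 0 then "o" else "x"
  let bits := fmtBin 18 (PySem.Int.band (position >>> (1 : Nat)) 0x3FFFF).toNat
  let cells := (PySem.List.pyRange 0 9 1).foldl (fun (acc : List String) (i : Int) =>
      let chunk := parseBin (PySem.List.slice bits (some (2 * i)) (some (2 * i + 2)))
      acc ++ [if chunk == 0 then "-" else if chunk == 1 then "x" else "o"]) []
  (PySem.Str.join "" cells, turn_char)

-- ===== PRECONDITION & SPEC =====
def Spec_unhash (position : Int) (out : String × String) : Prop := out = unhash_alt position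
instance (position : Int) (out : String × String) : Decidable (Spec_unhash position out) := by unfold Spec_unhash; infer_instance

-- ===== CLAIM (what is proved, stated in full; the proofs are below) =====
def Claim_equal_unhash : Prop := ∀ (position : Int), Dom_unhash position → Spec_unhash position (unhash position)

-- ===== LEMMAS AND PROOFS =====

theorem negsub_emod (x M : Int) (h : 0 < M) : (-x-1) % M + x % M = M - 1 := by
  have h1 : (-x-1) % M = (-x-1) - M * ((-x-1)/M) := by rw [Int.emod_def]
  have h2 : x % M = x - M * (x/M) := by rw [Int.emod_def]
  have h3 := Int.emod_nonneg (-x-1) (ne_of_gt h)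
  have h4 := Int.emod_lt_of_pos (-x-1) h
  have h5 := Int.emod_nonneg x (ne_of_gt h)
  have h6 := Int.emod_lt_of_pos x h
  set q1 := (-x-1)/M; set q2 := x/M
  have hs : q1 + q2 + 1 = 0 := by
    by_contra hne
    have hd : q1+q2+1 ≥ 1 ∨ q1+q2+1 ≤ -1 := by omega
    rcases hd with hss|hss
    · nlinarith
    · nlinarith
  nlinarith

-- Python's x & (2^n - 1) is exactly the (always nonnegative) remainder mod 2^n, also for x < 0
theorem band_mask (x : Int) (n : Nat) : PySem.Int.band x (2 ^ n - 1) = x % (2 ^ n) := by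
  have hpow : ((2:Int) ^ n) = ((2 ^ n : Nat) : Int) := by push_cast; ring
  have hM : (0:Int) < 2 ^ n := by positivity
  have hmask : (0:Int) ≤ 2 ^ n - 1 := by omega
  have h1 : ((2:Int) ^ n - 1).toNat = 2 ^ n - 1 := by omega
  by_cases hx : 0 ≤ x
  · rw [PySem.Int.band_of_nonneg hx hmask, h1, Nat.and_two_pow_sub_one_eq_mod]
    have h2 : x % 2 ^ n = ((x.toNat % 2 ^ n : Nat) : Int) := by
      conv_lhs => rw [← Int.toNat_of_nonneg hx, hpow]
      push_cast; rfl
    omega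
  · unfold PySem.Int.band
    rw [if_neg hx, if_pos hmask, h1, Nat.and_comm, Nat.and_two_pow_sub_one_eq_mod]
    have h2 : (-x-1) % 2 ^ n = (((-x-1).toNat % 2 ^ n : Nat) : Int) := by
      conv_lhs => rw [← Int.toNat_of_nonneg (by omega : (0:Int) ≤ -x-1), hpow]
      push_cast; rfl
    have h6 := negsub_emod x (2^n) hM
    have h4 := Int.emod_nonneg x (by omega : (2:Int)^n ≠ 0)
    omega

theorem shiftR_shiftR (x : Int) (a b : Nat) : (x >>> a) >>> b = x >>> (a + b) := by
  simp [Int.shiftRight_eq_div_pow, pow_add, Int.ediv_ediv_of_nonneg]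

-- the body of A's loop, and the descending index list it runs over
def stepA (st : List String × Int) (i : Int) : List String × Int :=
  let piece := PySem.Int.band st.2 3
  let arr := if piece ≠ 0 then
      st.1.set i.toNat (if piece == 1 then "x" else "o")
    else st.1
  (arr, st.2 >>> (2 : Nat))

def cellStr (x : Int) : String := if x ≠ 0 then (if x == 1 then "x" else "o") else "-"

def bitC (n : Nat) (e : Nat) : Char := if n / 2 ^ e % 2 = 1 then '1' else '0'

def descList : Nat → List Int
  | 0 => [0]
  | k + 1 => (k + 1 : Nat) :: descList k

theorem foldA_len (l : List Int) (arr : List String) (p : Int) :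
    (l.foldl stepA (arr, p)).1.length = arr.length := by
  induction l generalizing arr p with
  | nil => rfl
  | cons a l ih =>
      rw [List.foldl_cons]
      show (List.foldl stepA (stepA (arr, p) a) l).1.length = arr.length
      have hs : stepA (arr, p) a =
          ((if PySem.Int.band p 3 ≠ 0 then arr.set a.toNat (if PySem.Int.band p 3 == 1 then "x" else "o") else arr),
            p >>> (2:Nat)) := rfl
      rw [hs, ih]
      split <;> simp

theorem foldA_get (k : Nat) (hk : k ≤ 8) (arr : List String) (hlen : arr.length = 9)
    (hd : ∀ j, j ≤ k → arr[j]? = some "-")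
    (p : Int) (j : Nat) (hj : j < 9) :
    ((descList k).foldl stepA (arr, p)).1[j]? =
      if j ≤ k then some (cellStr (PySem.Int.band (p >>> (2 * (k - j))) 3)) else arr[j]? := by
  induction k generalizing arr p with
  | zero =>
      unfold descList
      show (stepA (arr, p) 0).1[j]? = _
      have hs : (stepA (arr, p) 0).1 =
          (if PySem.Int.band p 3 ≠ 0 then arr.set 0 (if PySem.Int.band p 3 == 1 then "x" else "o") else arr) := rfl
      rw [hs]
      by_cases h : j = 0
      · subst h
        simp only [Int.shiftRight_zero] at *
        split_ifs with h1 <;>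
          simp_all [cellStr, hd 0 (by omega)]
      · rw [if_neg (by omega : ¬ j ≤ 0)]
        split_ifs <;> first | rfl | rw [List.getElem?_set_ne (by omega : (0:Nat) ≠ j)]
  | succ k ih =>
      unfold descList
      rw [List.foldl_cons]
      show (List.foldl stepA (stepA (arr, p) ((k+1 : Nat) : Int)) (descList k)).1[j]? = _
      have hs : stepA (arr, p) ((k+1 : Nat) : Int) =
          ((if PySem.Int.band p 3 ≠ 0 then arr.set (k+1) (if PySem.Int.band p 3 == 1 then "x" else "o") else arr),
            p >>> (2:Nat)) := by
        unfold stepA; norm_num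
      rw [hs]
      set arr' := (if PySem.Int.band p 3 ≠ 0 then arr.set (k+1) (if PySem.Int.band p 3 == 1 then "x" else "o") else arr) with harr'
      have hlen' : arr'.length = 9 := by rw [harr']; split <;> simp [hlen]
      have hd' : ∀ j, j ≤ k → arr'[j]? = some "-" := by
        intro j hjk
        rw [harr']
        split
        · rw [List.getElem?_set_ne (by omega : k + 1 ≠ j)]; exact hd j (by omega)
        · exact hd j (by omega)
      rw [ih (by omega) arr' hlen' hd' (p >>> (2:Nat))]
      by_cases hjk : j ≤ k
      · rw [if_pos hjk, if_pos (by omega), shiftR_shiftR,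
            show 2 + 2 * (k - j) = 2 * (k + 1 - j) from by omega]
      · rw [if_neg hjk]
        by_cases hje : j = k + 1
        · subst hje
          rw [if_pos (le_refl _), harr']
          have hlt : k + 1 < arr.length := by omega
          have hz : 2 * (k + 1 - (k + 1)) = 0 := by omega
          rw [hz]
          have hdk := hd (k+1) (le_refl _)
          rw [List.getElem?_eq_getElem hlt] at hdk
          split_ifs with h1 <;> simp_all [cellStr]
        · rw [if_neg (by omega : ¬ j ≤ k + 1), harr']
          split
          · rw [List.getElem?_set_ne (by omega : k + 1 ≠ j)]
          · rfl

-- one board cell: A's masked two-bit value against B's two sliced binary characters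
theorem cell_eq (m : Int) (n : Nat) (hn : (n:Int) = m % 262144) (k : Nat) (hk : k ≤ 8) :
    cellStr (PySem.Int.band (m >>> (2*k)) 3) =
      (if parseBin [bitC n (2*k+1), bitC n (2*k)] == 0 then "-"
       else if parseBin [bitC n (2*k+1), bitC n (2*k)] == 1 then "x" else "o") := by
  have hb : PySem.Int.band (m >>> (2*k)) 3 = m / ((2^(2*k) : Nat) : Int) % 4 := by
    rw [show (3:Int) = 2^2 - 1 from by norm_num, band_mask, Int.shiftRight_eq_div_pow]
    norm_num
  have hcm : ∀ c : Int, cellStr c = if c == 0 then "-" else if c == 1 then "x" else "o" := by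
    intro c
    unfold cellStr
    by_cases hc0 : c = 0 <;> by_cases hc1 : c = 1 <;> simp [hc0, hc1]
  have hv : m / ((2^(2*k) : Nat) : Int) % 4 = parseBin [bitC n (2*k+1), bitC n (2*k)] := by
    simp only [parseBin, bitC, List.foldl]
    by_cases h1 : n / 2^(2*k+1) % 2 = 1 <;> by_cases h0 : n / 2^(2*k) % 2 = 1 <;>
      simp [h1, h0] <;> interval_cases k <;> norm_num at h1 h0 ⊢ <;> omega
  rw [hb, hv, hcm]

-- B's cell list, computed to a map over the nine cell indices
theorem cellsB_eq (n : Nat) :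
    ((PySem.List.pyRange 0 9 1).foldl (fun (acc : List String) (i : Int) =>
      let chunk := parseBin (PySem.List.slice (fmtBin 18 n) (some (2 * i)) (some (2 * i + 2)))
      acc ++ [if chunk == 0 then "-" else if chunk == 1 then "x" else "o"]) []) =
    (List.range 9).map (fun j =>
      let c := parseBin [bitC n (17 - 2*j), bitC n (16 - 2*j)]
      if c == 0 then "-" else if c == 1 then "x" else "o") := by
  have hb : fmtBin 18 n = [bitC n 17, bitC n 16, bitC n 15, bitC n 14, bitC n 13, bitC n 12,
      bitC n 11, bitC n 10, bitC n 9, bitC n 8, bitC n 7, bitC n 6, bitC n 5, bitC n 4,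
      bitC n 3, bitC n 2, bitC n 1, bitC n 0] := by
    simp [fmtBin, bitC, List.range_succ]
  have hr : PySem.List.pyRange 0 9 1 = [0,1,2,3,4,5,6,7,8] := by decide
  rw [hb, hr]
  simp only [List.foldl]
  norm_num [PySem.List.slice, show Int.toNat 2 = 2 from rfl, show Int.toNat 4 = 4 from rfl,
    show Int.toNat 6 = 6 from rfl, show Int.toNat 8 = 8 from rfl, show Int.toNat 10 = 10 from rfl,
    show Int.toNat 12 = 12 from rfl, show Int.toNat 14 = 14 from rfl,
    show Int.toNat 16 = 16 from rfl, show Int.toNat 18 = 18 from rfl, List.range_succ,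
    List.take_succ_cons, List.drop_succ_cons]

-- ===== VERDICT (by name: the statement is the Claim_ definition above) =====
theorem unhash_spec : Claim_equal_unhash := by
  intro position _
  unfold Spec_unhash unhash unhash_alt
  set m := position >>> (1 : Nat) with hm
  -- the turn character
  have hb1 : PySem.Int.band position 1 = position % 2 := by
    have h := band_mask position 1
    norm_num at h
    exact h
  have hturn : (if PySem.Int.band position 1 == 1 then "o" else "x")
      = (if PySem.Int.band position 1 ≠ 0 then "o" else "x") := by
    have h2 : position % 2 = 0 ∨ position % 2 = 1 := by omega
    rcases h2 with h2 | h2 <;> simp [hb1, h2]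
  -- the body bits
  have hbm : PySem.Int.band m 262143 = m % 262144 := by
    have h := band_mask m 18
    norm_num at h
    exact h
  have hn : ((PySem.Int.band m 262143).toNat : Int) = m % 262144 := by
    rw [hbm]
    exact Int.toNat_of_nonneg (Int.emod_nonneg _ (by norm_num))
  set n := (PySem.Int.band m 262143).toNat with hndef
  -- A's cell list
  have hconv : (PySem.List.pyRange 8 (-1) (-1)).foldl
      (fun (st : List String × Int) (i : Int) =>
        let piece := PySem.Int.band st.2 3
        let arr := if piece ≠ 0 then
            st.1.set i.toNat (if piece == 1 then "x" else "o")
          else st.1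
        (arr, st.2 >>> (2 : Nat))) (List.replicate 9 "-", m)
      = (descList 8).foldl stepA (List.replicate 9 "-", m) := by
    rw [show PySem.List.pyRange 8 (-1) (-1) = descList 8 from by decide]
    rfl
  have hA : ((descList 8).foldl stepA (List.replicate 9 "-", m)).1 =
      (List.range 9).map (fun j : Nat => cellStr (PySem.Int.band (m >>> ((2 * (8 - j) : Nat))) 3)) := by
    apply List.ext_getElem?
    intro j
    by_cases hj : j < 9
    · rw [foldA_get 8 (by norm_num) _ (by simp)
        (fun j hj => by rw [List.getElem?_replicate]; simp; omega) m j hj,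
        if_pos (by omega : j ≤ 8)]
      simp [hj]
    · have hlenA : ((descList 8).foldl stepA (List.replicate 9 "-", m)).1.length = 9 := by
        rw [foldA_len]; simp
      rw [List.getElem?_eq_none (by omega : ((descList 8).foldl stepA (List.replicate 9 "-", m)).1.length ≤ j),
        List.getElem?_eq_none (by simp; omega)]
  -- the two cell lists agree
  have hcells : (List.range 9).map (fun j : Nat => cellStr (PySem.Int.band (m >>> ((2 * (8 - j) : Nat))) 3)) =
      (List.range 9).map (fun j =>
        let c := parseBin [bitC n (17 - 2*j), bitC n (16 - 2*j)]
        if c == 0 then "-" else if c == 1 then "x" else "o") := by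
    apply List.map_congr_left
    intro j hjmem
    have hj : j < 9 := List.mem_range.mp hjmem
    have e1 : 17 - 2*j = 2*(8-j)+1 := by omega
    have e2 : 16 - 2*j = 2*(8-j) := by omega
    simp only [e1, e2]
    exact cell_eq m n hn (8-j) (by omega)
  simp only [hconv, hA, hcells, hturn, cellsB_eq n]
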